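-- pv_equiv track=rewrite | github.com/99yuseong/Algorithm | 백준/Gold/17471. 게리맨더링/게리맨더링.py | bfs
-- ===== SOURCE A (Python) =====
-- from collections import deque
--
-- def bfs(mask, graph, N):
--
--     queue = deque()
--
--     for i in range(1, N+1):
--         if mask & (1 << i):
--             queue.append(i)
--             mask &= ~(1 << i)
--             break
--
--     while queue:
--         cur = queue.popleft()
--
--         for near in graph[cur]:
--             if mask & (1 << near):
--                 queue.append(near)
--                 mask &= ~(1 << near)
--
--     return mask == 0
-- ===== SOURCE B (Python) =====
-- def bfs(mask, graph, N):
--     # Bitmask fixed-point reachability: no queue; the reachable set is kept as an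
--     # integer bitmask and expanded by whole-graph sweeps until it stops growing.
--     n = len(graph)
--     start = -1
--     for i in range(1, N + 1):
--         if mask >> i & 1:
--             start = i
--             break
--     if start < 0:
--         return mask == 0
--     reach = 1 << start
--     for _ in range(n + 1):
--         new = reach
--         for u in range(n):
--             if reach >> u & 1:
--                 for v in graph[u]:
--                     if mask >> v & 1:
--                         new |= 1 << v
--         if new == reach:
--             break
--         reach = new
--     return mask & ~reach == 0
-- ===== Notes on version B (the rewrite author's own statement) =====
-- stated objective: alternative
-- what changed: A's BFS with a deque and in-place mask clearing is replaced by a queue-free bitmask fixed point: the reachable set is kept as one integer and grown by whole-graph sweeps until it stops changing, then compared against the mask.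
import Mathlib
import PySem

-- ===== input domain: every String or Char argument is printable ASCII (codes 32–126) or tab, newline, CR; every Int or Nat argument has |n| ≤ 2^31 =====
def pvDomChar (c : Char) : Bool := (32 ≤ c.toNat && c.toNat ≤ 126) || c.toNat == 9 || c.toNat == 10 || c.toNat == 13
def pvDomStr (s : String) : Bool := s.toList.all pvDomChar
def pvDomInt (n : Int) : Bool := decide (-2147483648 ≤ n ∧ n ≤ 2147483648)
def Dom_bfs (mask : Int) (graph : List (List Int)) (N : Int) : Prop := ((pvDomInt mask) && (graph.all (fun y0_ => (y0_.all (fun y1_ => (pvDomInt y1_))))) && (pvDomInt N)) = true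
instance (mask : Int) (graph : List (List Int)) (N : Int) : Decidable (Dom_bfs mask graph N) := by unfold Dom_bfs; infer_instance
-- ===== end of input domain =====

-- B replaces A's BFS queue by a bitmask fixed-point sweep (alternative algorithm, not faster).

-- Python's  1 << k  /  a >> k  (Nat shift amounts; negative shift counts raise in Python and lie outside Pre_)
def pvBit (k : Nat) : Int := (1 : Int) <<< k
def pvShr (a : Int) (k : Nat) : Int := a >>> k

-- ===== PORT A =====
-- the `for i in range(1, N+1): … break` start scan
def bfsFind (m : Int) : List Int → Int × List Int
  | [] => (m, [])
  | i :: rest =>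
    if PySem.Int.band m (pvBit i.toNat) ≠ 0 then
      (PySem.Int.band m (Int.not (pvBit i.toNat)), [i])
    else bfsFind m rest

-- the `for near in graph[cur]: …` body
def bfsInner (m : Int) (q : List Int) (row : List Int) : Int × List Int :=
  row.foldl (fun s near =>
    if PySem.Int.band s.1 (pvBit near.toNat) ≠ 0 then
      (PySem.Int.band s.1 (Int.not (pvBit near.toNat)), s.2 ++ [near])
    else s) (m, q)

-- the `while queue:` loop; fuel only makes the recursion total (never exhausted on Pre_)
def bfsLoop (graph : List (List Int)) : Nat → Int → List Int → Int
  | 0, m, _ => m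
  | _ + 1, m, [] => m
  | fuel + 1, m, cur :: q =>
    let s := bfsInner m q ((PySem.List.pyGet? graph cur).getD [])
    bfsLoop graph fuel s.1 s.2

def bfs (mask : Int) (graph : List (List Int)) (N : Int) : Bool :=
  decide (bfsLoop graph (graph.length + 2)
    (bfsFind mask (PySem.List.pyRange 1 (N + 1))).1
    (bfsFind mask (PySem.List.pyRange 1 (N + 1))).2 = 0)

-- ===== PORT B =====
-- the start scan of Source B (`start = -1; for i …: start = i; break`)
def altFind (m : Int) : List Int → Int
  | [] => -1
  | i :: rest => if PySem.Int.band (pvShr m i.toNat) 1 ≠ 0 then i else altFind m rest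

-- `for v in graph[u]: if mask >> v & 1: new |= 1 << v`
def altStepRow (mask acc : Int) (row : List Int) : Int :=
  row.foldl (fun a v =>
    if PySem.Int.band (pvShr mask v.toNat) 1 ≠ 0 then PySem.Int.bor a (pvBit v.toNat)
    else a) acc

-- one sweep `new = reach; for u in range(n): if reach >> u & 1: …`
def altStep (mask : Int) (graph : List (List Int)) (R : Int) : Int :=
  (PySem.List.pyRange 0 (graph.length : Int)).foldl (fun a u =>
    if PySem.Int.band (pvShr R u.toNat) 1 ≠ 0 then
      altStepRow mask a ((PySem.List.pyGet? graph u).getD [])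
    else a) R

-- `for _ in range(n+1): new = …; if new == reach: break; reach = new`
def altIter (mask : Int) (graph : List (List Int)) : Nat → Int → Int
  | 0, R => R
  | f + 1, R =>
    let new := altStep mask graph R
    if new = R then R else altIter mask graph f new

def bfs_alt (mask : Int) (graph : List (List Int)) (N : Int) : Bool :=
  if altFind mask (PySem.List.pyRange 1 (N + 1)) < 0 then decide (mask = 0)
  else decide (PySem.Int.band mask
    (Int.not (altIter mask graph (graph.length + 1)
      (pvBit (altFind mask (PySem.List.pyRange 1 (N + 1))).toNat))) = 0)

-- ===== PRECONDITION & SPEC =====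
-- Helpers for Pre_ only (independent of both ports): the set of node indices A's BFS
-- actually visits, computed as a fixed point of one expansion step over Finset Nat.
-- A's start node: the first i in 1..N whose mask bit is set
-- the scan is truncated at bitLength+2 so it stays evaluable for huge N: the first set
-- bit in 1..N, if any, always lies below bitLength mask + 2 (proved in pv_start_some)
def pvStart (mask N : Int) : Option Int :=
  (PySem.List.pyRange 1 (min (N + 1) ((PySem.Int.bitLength mask : Int) + 2))).find?
    (fun i => mask.testBit i.toNat)

-- indices a row enqueues: nonnegative entries whose mask bit is set
def pvRowTargets (mask : Int) (row : List Int) : Finset Nat :=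
  ((row.filter (fun v => decide (0 ≤ v) && mask.testBit v.toNat)).map Int.toNat).toFinset

-- everything any row could ever enqueue (a universe bounding the fixed-point iteration)
def pvUniv (mask : Int) (graph : List (List Int)) : Finset Nat :=
  (Finset.range graph.length).biUnion (fun u => pvRowTargets mask (graph.getD u []))

-- one expansion step: add the targets of every in-range visited row
def pvStepSet (mask : Int) (graph : List (List Int)) (S : Finset Nat) : Finset Nat :=
  S ∪ (Finset.range graph.length).biUnion
    (fun u => if u ∈ S then pvRowTargets mask (graph.getD u []) else ∅)

def pvIterSet (mask : Int) (graph : List (List Int)) : Nat → Finset Nat → Finset Nat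
  | 0, S => S
  | f + 1, S => if pvStepSet mask graph S = S then S else pvIterSet mask graph f (pvStepSet mask graph S)

-- the visited closure (∅ when no start bit exists, where A touches nothing)
def pvReachSet (mask : Int) (graph : List (List Int)) (N : Int) : Finset Nat :=
  match pvStart mask N with
  | none => ∅
  | some i => pvIterSet mask graph ((insert i.toNat (pvUniv mask graph)).card + 1) {i.toNat}

-- Pre_ excludes exactly the inputs on which A raises: those where the BFS reaches a node
-- index outside graph's range (IndexError at graph[cur]) or reaches a row containing a
-- negative entry (ValueError at 1 << near); everywhere A returns a value, Pre_ holds.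
def Pre_bfs (mask : Int) (graph : List (List Int)) (N : Int) : Prop :=
  ∀ u ∈ pvReachSet mask graph N, u < graph.length ∧ ∀ v ∈ graph.getD u [], 0 ≤ v
instance (mask : Int) (graph : List (List Int)) (N : Int) : Decidable (Pre_bfs mask graph N) := by
  unfold Pre_bfs; infer_instance

def pvWitness_bfs : Int × List (List Int) × Int := (6, [[], [2], [1]], 2)

def Spec_bfs (mask : Int) (graph : List (List Int)) (N : Int) (out : Bool) : Prop :=
  out = bfs_alt mask graph N
instance (mask : Int) (graph : List (List Int)) (N : Int) (out : Bool) :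
    Decidable (Spec_bfs mask graph N out) := by unfold Spec_bfs; infer_instance

-- ===== CLAIM (what is proved, stated in full; the proofs are below) =====
def Claim_equal_bfs : Prop := ∀ (mask : Int) (graph : List (List Int)) (N : Int),
  Dom_bfs mask graph N → Pre_bfs mask graph N → Spec_bfs mask graph N (bfs mask graph N)

-- ===== LEMMAS AND PROOFS =====

-- ---- bit-level bridges ----

theorem pv_ldiff_add_and (m : Nat) : ∀ n : Nat, Nat.ldiff m n + (m &&& n) = m := by
  induction m using Nat.binaryRec with
  | zero =>
    intro n
    have h1 : Nat.ldiff 0 n = 0 := by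
      apply Nat.eq_of_testBit_eq; intro i
      simp [Nat.testBit_ldiff, Nat.zero_testBit]
    have h2 : 0 &&& n = 0 := by simp
    omega
  | bit b m IH =>
    intro n
    cases n using Nat.bitCasesOn with
    | bit c n' =>
      rw [Nat.ldiff_bit, Nat.land_bit]
      have := IH n'
      cases b <;> cases c <;> simp [Nat.bit_val] <;> omega

theorem pv_sub_and_testBit (m n j : Nat) :
    (m - (m &&& n)).testBit j = (m.testBit j && !(n.testBit j)) := by
  have h1 := pv_ldiff_add_and m n
  have h2 : m &&& n ≤ m := Nat.and_le_left
  have h3 : m - (m &&& n) = Nat.ldiff m n := by omega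
  rw [h3, Nat.testBit_ldiff]

theorem pv_band_ofNat_negSucc (m n : Nat) :
    PySem.Int.band (Int.ofNat m) (Int.negSucc n) = Int.ofNat (m - (m &&& n)) := by
  have e2 : Int.negSucc n = -(n : Int) - 1 := by rw [Int.negSucc_eq]; ring
  rw [show Int.ofNat m = (m : Int) from rfl, e2]
  unfold PySem.Int.band
  rw [if_pos (by omega), if_neg (by omega)]
  rw [show (-(-(n : Int) - 1) - 1).toNat = n by omega, show ((m : Int)).toNat = m by omega]
  rfl

theorem pv_band_negSucc_ofNat (m n : Nat) :
    PySem.Int.band (Int.negSucc m) (Int.ofNat n) = Int.ofNat (n - (n &&& m)) := by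
  have e2 : Int.negSucc m = -(m : Int) - 1 := by rw [Int.negSucc_eq]; ring
  rw [show Int.ofNat n = (n : Int) from rfl, e2]
  unfold PySem.Int.band
  rw [if_neg (by omega), if_pos (by omega)]
  rw [show (-(-(m : Int) - 1) - 1).toNat = m by omega, show ((n : Int)).toNat = n by omega]
  rfl

theorem pv_band_negSucc_negSucc (m n : Nat) :
    PySem.Int.band (Int.negSucc m) (Int.negSucc n) = Int.negSucc (m ||| n) := by
  have e1 : Int.negSucc m = -(m : Int) - 1 := by rw [Int.negSucc_eq]; ring
  have e2 : Int.negSucc n = -(n : Int) - 1 := by rw [Int.negSucc_eq]; ring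
  rw [e1, e2]
  unfold PySem.Int.band
  rw [if_neg (by omega), if_neg (by omega)]
  rw [show (-(-(m : Int) - 1) - 1).toNat = m by omega, show (-(-(n : Int) - 1) - 1).toNat = n by omega]
  rw [Int.negSucc_eq]
  ring

theorem pv_tb_ofNat (m : Nat) (j : Nat) : (Int.ofNat m).testBit j = m.testBit j := rfl

theorem pv_tb_natCast (m : Nat) (j : Nat) : ((m : Nat) : Int).testBit j = m.testBit j := rfl

theorem pv_tb_negSucc (m : Nat) (j : Nat) : (Int.negSucc m).testBit j = !(m.testBit j) := rfl

theorem pv_tb_band (a b : Int) (j : Nat) :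
    (PySem.Int.band a b).testBit j = (a.testBit j && b.testBit j) := by
  rcases a with m | m <;> rcases b with n | n
  · rw [show Int.ofNat m = ((m : Nat) : Int) from rfl, show Int.ofNat n = ((n : Nat) : Int) from rfl,
      PySem.Int.band_natCast]
    rw [pv_tb_natCast, pv_tb_natCast, pv_tb_natCast, Nat.testBit_and]
  · rw [pv_band_ofNat_negSucc, pv_tb_ofNat, pv_sub_and_testBit, pv_tb_ofNat, pv_tb_negSucc]
  · rw [pv_band_negSucc_ofNat, pv_tb_ofNat, pv_sub_and_testBit, pv_tb_negSucc, pv_tb_ofNat]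
    cases m.testBit j <;> cases n.testBit j <;> rfl
  · rw [pv_band_negSucc_negSucc, pv_tb_negSucc, pv_tb_negSucc, pv_tb_negSucc, Nat.testBit_or]
    cases m.testBit j <;> cases n.testBit j <;> rfl

theorem pv_tb_not (a : Int) (j : Nat) : (Int.not a).testBit j = !(a.testBit j) := by
  rcases a with m | m
  · rfl
  · show (Int.ofNat m).testBit j = !(Int.negSucc m).testBit j
    rw [pv_tb_ofNat, pv_tb_negSucc, Bool.not_not]

theorem pv_one_shift (k : Nat) : pvBit k = ((2 ^ k : Nat) : Int) := by
  show Int.ofNat (1 <<< k) = _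
  rw [Nat.shiftLeft_eq, Nat.one_mul]
  rfl

theorem pv_tb_one_shift (k j : Nat) : (pvBit k).testBit j = decide (k = j) := by
  rw [pv_one_shift, pv_tb_natCast, Nat.testBit_two_pow]

theorem pv_tb_shiftRight_zero (a : Int) (k : Nat) : (pvShr a k).testBit 0 = a.testBit k := by
  rcases a with m | m
  · show (Int.ofNat (m >>> k)).testBit 0 = (Int.ofNat m).testBit k
    rw [pv_tb_ofNat, pv_tb_ofNat, Nat.testBit_shiftRight, Nat.add_zero]
  · show (Int.negSucc (m >>> k)).testBit 0 = (Int.negSucc m).testBit k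
    rw [pv_tb_negSucc, pv_tb_negSucc, Nat.testBit_shiftRight, Nat.add_zero]

theorem pv_int_eq_zero_iff (a : Int) : a = 0 ↔ ∀ j, a.testBit j = false := by
  constructor
  · rintro rfl j
    rw [show (0 : Int) = Int.ofNat 0 from rfl, pv_tb_ofNat, Nat.zero_testBit]
  · intro h
    rcases a with m | m
    · have : m = 0 := by
        apply Nat.eq_of_testBit_eq; intro i
        rw [Nat.zero_testBit]; exact h i
      simp [this]
    · exfalso
      have hm := h m
      rw [pv_tb_negSucc] at hm
      have h2 : m.testBit m = false := Nat.testBit_lt_two_pow Nat.lt_two_pow_self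
      rw [h2] at hm
      simp at hm

theorem pv_int_ext (a b : Int) (h : ∀ j, a.testBit j = b.testBit j) : a = b := by
  rcases a with m | m <;> rcases b with n | n
  · have : m = n := Nat.eq_of_testBit_eq fun i => h i
    simp [this]
  · exfalso
    have h1 := h (m + n)
    rw [pv_tb_ofNat, pv_tb_negSucc] at h1
    have hm : m.testBit (m + n) = false :=
      Nat.testBit_lt_two_pow (lt_of_lt_of_le Nat.lt_two_pow_self (Nat.pow_le_pow_right (by omega) (by omega)))
    have hn : n.testBit (m + n) = false :=
      Nat.testBit_lt_two_pow (lt_of_lt_of_le Nat.lt_two_pow_self (Nat.pow_le_pow_right (by omega) (by omega)))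
    rw [hm, hn] at h1
    exact Bool.false_ne_true h1
  · exfalso
    have h1 := h (m + n)
    rw [pv_tb_ofNat, pv_tb_negSucc] at h1
    have hm : m.testBit (m + n) = false :=
      Nat.testBit_lt_two_pow (lt_of_lt_of_le Nat.lt_two_pow_self (Nat.pow_le_pow_right (by omega) (by omega)))
    have hn : n.testBit (m + n) = false :=
      Nat.testBit_lt_two_pow (lt_of_lt_of_le Nat.lt_two_pow_self (Nat.pow_le_pow_right (by omega) (by omega)))
    rw [hm, hn] at h1
    exact Bool.false_ne_true h1.symm
  · have : m = n := Nat.eq_of_testBit_eq fun i => by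
      have h1 := h i
      rw [pv_tb_negSucc, pv_tb_negSucc] at h1
      exact Bool.not_injective h1
    simp [this]

theorem pv_band_bit_ne_zero (m : Int) (k : Nat) :
    (PySem.Int.band m (pvBit k) ≠ 0) ↔ m.testBit k = true := by
  rw [Ne, pv_int_eq_zero_iff]
  push_neg
  constructor
  · rintro ⟨j, hj⟩
    rw [Bool.ne_false_iff, pv_tb_band, pv_tb_one_shift, Bool.and_eq_true, decide_eq_true_eq] at hj
    rcases hj with ⟨h1, rfl⟩; exact h1
  · intro h
    exact ⟨k, by rw [Bool.ne_false_iff, pv_tb_band, pv_tb_one_shift]; simp [h]⟩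

theorem pv_band_shift_one_ne_zero (m : Int) (k : Nat) :
    (PySem.Int.band (pvShr m k) 1 ≠ 0) ↔ m.testBit k = true := by
  have h := pv_band_bit_ne_zero (pvShr m k) 0
  rw [pv_tb_shiftRight_zero] at h
  rw [show (1 : Int) = pvBit 0 from rfl]
  exact h

theorem pv_clear_tb (m : Int) (k j : Nat) :
    (PySem.Int.band m (Int.not (pvBit k))).testBit j = (m.testBit j && !(decide (k = j))) := by
  rw [pv_tb_band, pv_tb_not, pv_tb_one_shift]

theorem pv_band_not_eq_zero (m R : Int) :
    PySem.Int.band m (Int.not R) = 0 ↔ ∀ j, m.testBit j = true → R.testBit j = true := by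
  rw [pv_int_eq_zero_iff]
  constructor
  · intro h j hm
    have h2 := h j
    rw [pv_tb_band, pv_tb_not, hm, Bool.true_and, Bool.not_eq_false'] at h2
    exact h2
  · intro h j
    rw [pv_tb_band, pv_tb_not]
    by_cases hm : m.testBit j = true
    · rw [hm, h j hm]; rfl
    · rw [Bool.not_eq_true] at hm; rw [hm]; rfl

theorem pv_bor_bit_tb (R : Int) (hR : 0 ≤ R) (k j : Nat) :
    (PySem.Int.bor R (pvBit k)).testBit j = (R.testBit j || decide (k = j)) := by
  obtain ⟨r, rfl⟩ := Int.eq_ofNat_of_zero_le hR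
  rw [pv_one_shift, PySem.Int.bor_of_nonneg (Int.natCast_nonneg r) (Int.natCast_nonneg _)]
  rw [Int.toNat_natCast, Int.toNat_natCast]
  rw [pv_tb_natCast, pv_tb_natCast, Nat.testBit_or, Nat.testBit_two_pow]

theorem pv_bor_bit_nonneg (R : Int) (hR : 0 ≤ R) (k : Nat) :
    0 ≤ PySem.Int.bor R (pvBit k) := by
  rw [pv_one_shift, PySem.Int.bor_of_nonneg hR (Int.natCast_nonneg _)]
  exact Int.natCast_nonneg _

-- ---- reachability ----

-- nodes reachable from s through edges whose target carries a set bit of the original mask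
inductive Rch (mask : Int) (graph : List (List Int)) (s : Nat) : Nat → Prop where
  | base : Rch mask graph s s
  | step {u : Nat} {v : Int} : Rch mask graph s u → v ∈ graph.getD u [] → 0 ≤ v →
      mask.testBit v.toNat = true → Rch mask graph s v.toNat

-- safety of every visited node, derived from Pre_ below; both loop lemmas assume it
def SafeRch (mask : Int) (graph : List (List Int)) (s : Nat) : Prop :=
  ∀ u : Nat, Rch mask graph s u → u < graph.length ∧ ∀ v ∈ graph.getD u [], 0 ≤ v

-- set bits of `mask` among node indices
def pvBits (mask : Int) (n : Nat) : Finset Nat :=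
  (Finset.range n).filter (fun j => mask.testBit j = true)

-- the invariant of A's BFS loop: C = already-cleared positions
def InvA (mask : Int) (graph : List (List Int)) (s : Nat) (C : Finset Nat)
    (m : Int) (q : List Int) : Prop :=
  (∀ j : Nat, m.testBit j = (mask.testBit j && !(decide (j ∈ C)))) ∧
  (∀ x ∈ q, 0 ≤ x ∧ x.toNat ∈ C) ∧
  (∀ c ∈ C, Rch mask graph s c) ∧
  C ⊆ pvBits mask graph.length ∧
  s ∈ C

-- the processed-closure clause, with one node (the one being expanded) exempt
def ClosedExc (mask : Int) (graph : List (List Int)) (C : Finset Nat) (q : List Int)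
    (e : Option Nat) : Prop :=
  ∀ c ∈ C, (↑c : Int) ∉ q → e ≠ some c →
    ∀ v ∈ graph.getD c [], 0 ≤ v → mask.testBit v.toNat = true → v.toNat ∈ C

theorem pv_getD_row (graph : List (List Int)) (u : Nat) :
    (graph[u]?).getD [] = graph.getD u [] := by
  simp [List.getD]

theorem pv_inner_spec (mask : Int) (graph : List (List Int)) (s : Nat) (cur : Nat)
    (row : List Int)
    (hrow : ∀ v ∈ row, 0 ≤ v ∧ (mask.testBit v.toNat = true →
      v.toNat < graph.length ∧ Rch mask graph s v.toNat)) :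
    ∀ m q C, InvA mask graph s C m q → ClosedExc mask graph C q (some cur) →
    ∃ C' Δ, C ⊆ C' ∧ (bfsInner m q row).2 = q ++ Δ ∧
      InvA mask graph s C' (bfsInner m q row).1 (bfsInner m q row).2 ∧
      ClosedExc mask graph C' (bfsInner m q row).2 (some cur) ∧
      (∀ v ∈ row, mask.testBit v.toNat = true → v.toNat ∈ C') ∧
      (∀ c ∈ C', c ∈ C ∨ (↑c : Int) ∈ (bfsInner m q row).2) ∧
      (bfsInner m q row).2.length + C.card = q.length + C'.card := by
  induction row with
  | nil =>
    intro m q C hInv hCl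
    exact ⟨C, [], Finset.Subset.refl C, by simp [bfsInner], hInv, hCl,
      by simp, fun c hc => Or.inl hc, by simp [bfsInner]⟩
  | cons v rest IH =>
    intro m q C hInv hCl
    obtain ⟨ha, hb, hc, he, hf⟩ := hInv
    obtain ⟨hv0, hvx⟩ := hrow v (by simp)
    have hstep : bfsInner m q (v :: rest) =
        bfsInner (if PySem.Int.band m (pvBit v.toNat) ≠ 0 then
            PySem.Int.band m (Int.not (pvBit v.toNat)) else m)
          (if PySem.Int.band m (pvBit v.toNat) ≠ 0 then q ++ [v] else q) rest := by
      simp only [bfsInner, List.foldl_cons]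
      by_cases hcnd : PySem.Int.band m (pvBit v.toNat) ≠ 0
      · rw [if_pos hcnd, if_pos hcnd, if_pos hcnd]
      · rw [if_neg hcnd, if_neg hcnd, if_neg hcnd]
    by_cases hbit : m.testBit v.toNat = true
    · -- bit still set: push v, clear bit
      have hcnd : PySem.Int.band m (pvBit v.toNat) ≠ 0 :=
        (pv_band_bit_ne_zero m v.toNat).mpr hbit
      rw [hstep, if_pos hcnd, if_pos hcnd]
      have hmask : mask.testBit v.toNat = true := by
        have := ha v.toNat; rw [hbit] at this
        cases hmk : mask.testBit v.toNat
        · rw [hmk] at this; simp at this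
        · rfl
      have hnotC : v.toNat ∉ C := by
        have := ha v.toNat; rw [hbit] at this
        intro hmem
        rw [hmask] at this; simp [hmem] at this
      have hInv1 : InvA mask graph s (insert v.toNat C)
          (PySem.Int.band m (Int.not (pvBit v.toNat))) (q ++ [v]) := by
        refine ⟨?_, ?_, ?_, ?_, ?_⟩
        · intro j
          rw [pv_clear_tb, ha j]
          by_cases h1 : j = v.toNat <;> by_cases h2 : j ∈ C <;>
            simp [Finset.mem_insert, h1, h2] <;> simp [eq_comm (a := v.toNat)] at * <;> tauto
        · intro x hx
          rcases List.mem_append.mp hx with hx | hx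
          · obtain ⟨h1, h2⟩ := hb x hx; exact ⟨h1, Finset.mem_insert_of_mem h2⟩
          · rcases List.mem_singleton.mp hx with rfl
            exact ⟨hv0, Finset.mem_insert_self _ _⟩
        · intro c hcm
          rcases Finset.mem_insert.mp hcm with rfl | hcm
          · exact (hvx hmask).2
          · exact hc c hcm
        · intro c hcm
          rcases Finset.mem_insert.mp hcm with rfl | hcm
          · exact Finset.mem_filter.mpr ⟨Finset.mem_range.mpr (hvx hmask).1, hmask⟩
          · exact he hcm
        · exact Finset.mem_insert_of_mem hf
      have hCl1 : ClosedExc mask graph (insert v.toNat C) (q ++ [v]) (some cur) := by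
        intro c hcm hnq hne
        rcases Finset.mem_insert.mp hcm with rfl | hcm
        · exfalso; apply hnq
          have hvv : ((v.toNat : Nat) : Int) = v := by omega
          rw [hvv]; simp
        · intro w hw hw0 hwm
          exact Finset.mem_insert_of_mem
            (hCl c hcm (fun hin => hnq (List.mem_append_left _ hin)) hne w hw hw0 hwm)
      obtain ⟨C', Δ', hsub', happ', hInv', hCl', hcov', horig', hcard'⟩ :=
        IH (fun w hw => hrow w (by simp [hw])) _ _ _ hInv1 hCl1
      refine ⟨C', [v] ++ Δ', ?_, ?_, hInv', hCl', ?_, ?_, ?_⟩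
      · exact (Finset.subset_insert _ _).trans hsub'
      · rw [happ']; simp
      · intro w hw hwm
        rcases List.mem_cons.mp hw with rfl | hw
        · exact hsub' (Finset.mem_insert_self _ _)
        · exact hcov' w hw hwm
      · intro c hcm
        rcases horig' c hcm with hcm1 | hcm1
        · rcases Finset.mem_insert.mp hcm1 with rfl | hcm1
          · right; rw [happ']
            have hvv : ((v.toNat : Nat) : Int) = v := by omega
            rw [hvv]; simp
          · exact Or.inl hcm1
        · exact Or.inr hcm1
      · rw [happ'] at hcard' ⊢
        rw [Finset.card_insert_of_notMem hnotC] at hcard'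
        simp at hcard' ⊢
        omega
    · -- bit already clear: skip
      have hcnd : ¬ PySem.Int.band m (pvBit v.toNat) ≠ 0 := by
        intro hne; exact hbit ((pv_band_bit_ne_zero m v.toNat).mp hne)
      rw [hstep, if_neg hcnd, if_neg hcnd]
      have hvC : mask.testBit v.toNat = true → v.toNat ∈ C := by
        intro hmk
        have := ha v.toNat
        rw [Bool.not_eq_true] at hbit
        rw [hbit, hmk] at this
        by_contra hmem
        simp [hmem] at this
      obtain ⟨C', Δ', hsub', happ', hInv', hCl', hcov', horig', hcard'⟩ :=
        IH (fun w hw => hrow w (by simp [hw])) _ _ _ ⟨ha, hb, hc, he, hf⟩ hCl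
      refine ⟨C', Δ', hsub', happ', hInv', hCl', ?_, horig', hcard'⟩
      intro w hw hwm
      rcases List.mem_cons.mp hw with rfl | hw
      · exact hsub' (hvC hwm)
      · exact hcov' w hw hwm

theorem pv_loop_spec (mask : Int) (graph : List (List Int)) (s : Nat)
    (hPre : SafeRch mask graph s) :
    ∀ fuel m q C, InvA mask graph s C m q → ClosedExc mask graph C q none →
    (pvBits mask graph.length).card + q.length < fuel + C.card →
    ((bfsLoop graph fuel m q = 0) ↔ ∀ j, mask.testBit j = true → Rch mask graph s j) := by
  intro fuel
  induction fuel with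
  | zero =>
    intro m q C hInv hCl hm
    exfalso
    have := Finset.card_le_card hInv.2.2.2.1
    omega
  | succ fuel IH =>
    intro m q C hInv hCl hm
    obtain ⟨ha, hb, hc, he, hf⟩ := hInv
    match q with
    | [] =>
      simp only [bfsLoop]
      have key : (m = 0) ↔ ∀ j, mask.testBit j = true → j ∈ C := by
        rw [pv_int_eq_zero_iff]
        constructor
        · intro h j hj
          have h2 := h j
          rw [ha j, hj, Bool.true_and, Bool.not_eq_false', decide_eq_true_eq] at h2
          exact h2
        · intro h j
          rw [ha j]
          by_cases hj : mask.testBit j = true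
          · rw [hj, Bool.true_and]
            simp [h j hj]
          · rw [Bool.not_eq_true] at hj; rw [hj]; rfl
      rw [key]
      constructor
      · intro h j hj; exact hc j (h j hj)
      · intro h j hj
        have hRC : ∀ k, Rch mask graph s k → k ∈ C := by
          intro k hk
          induction hk with
          | base => exact hf
          | step hu hv h0 hmk IH2 =>
            exact hCl _ IH2 (by simp) (by simp) _ hv h0 hmk
        exact hRC j (h j hj)
    | cur :: q =>
      obtain ⟨hc0, hcC⟩ := hb cur (by simp)
      have hcn : cur.toNat < graph.length := by
        have := Finset.mem_range.mp (Finset.mem_filter.mp (he hcC)).1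
        exact this
      have hrowe : (PySem.List.pyGet? graph cur).getD [] = graph.getD cur.toNat [] := by
        rw [show cur = ((cur.toNat : Nat) : Int) by omega, PySem.List.pyGet?_natCast,
          pv_getD_row, Int.toNat_natCast]
      have hrow : ∀ v ∈ graph.getD cur.toNat [], 0 ≤ v ∧ (mask.testBit v.toNat = true →
          v.toNat < graph.length ∧ Rch mask graph s v.toNat) := by
        intro v hv
        have hcur : Rch mask graph s cur.toNat := hc _ hcC
        obtain ⟨hclen, hnn⟩ := hPre _ hcur
        refine ⟨hnn v hv, fun hmk => ?_⟩
        have hr : Rch mask graph s v.toNat := Rch.step hcur hv (hnn v hv) hmk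
        exact ⟨(hPre _ hr).1, hr⟩
      have hInvT : InvA mask graph s C m q :=
        ⟨ha, fun x hx => hb x (by simp [hx]), hc, he, hf⟩
      have hClT : ClosedExc mask graph C q (some cur.toNat) := by
        intro c hcm hnq hne
        apply hCl c hcm
        · intro hin
          rcases List.mem_cons.mp hin with heq | hin
          · apply hne; congr 1; omega
          · exact hnq hin
        · simp
      obtain ⟨C', Δ, hsub, happ, hInv', hCl', hcov, horig, hcard⟩ :=
        pv_inner_spec mask graph s cur.toNat _ hrow m q C hInvT hClT
      simp only [bfsLoop]
      rw [hrowe]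
      apply IH _ _ C' hInv'
      · intro c hcm hnq
        intro _
        by_cases hcur : c = cur.toNat
        · subst hcur
          intro w hw hw0 hwm
          exact hcov w hw hwm
        · rcases horig c hcm with hcm1 | hcm1
          · exact hCl' c hcm (by exact hnq)
              (by intro hcon; exact hcur (Option.some.inj hcon).symm)
          · exact absurd hcm1 hnq
      · have hq : q.length + 1 = (cur :: q).length := by simp
        omega

-- ---- B side ----

-- bits of R lie below n, R nonnegative
def SInv (R : Int) (n : Nat) : Prop := 0 ≤ R ∧ ∀ j, R.testBit j = true → j < n

theorem pv_row_nonneg (mask : Int) (row : List Int) : ∀ acc : Int, 0 ≤ acc →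
    0 ≤ altStepRow mask acc row := by
  induction row with
  | nil => intro acc h; exact h
  | cons v rest IH =>
    intro acc h
    simp only [altStepRow, List.foldl_cons]
    by_cases hcnd : PySem.Int.band (pvShr mask v.toNat) 1 ≠ 0
    · rw [if_pos hcnd]; exact IH _ (pv_bor_bit_nonneg acc h v.toNat)
    · rw [if_neg hcnd]; exact IH _ h

theorem pv_row_mono (mask : Int) (row : List Int) : ∀ acc : Int, 0 ≤ acc → ∀ j : Nat,
    acc.testBit j = true → (altStepRow mask acc row).testBit j = true := by
  induction row with
  | nil => intro acc _ j h; exact h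
  | cons v rest IH =>
    intro acc h0 j h
    simp only [altStepRow, List.foldl_cons]
    by_cases hcnd : PySem.Int.band (pvShr mask v.toNat) 1 ≠ 0
    · rw [if_pos hcnd]
      apply IH _ (pv_bor_bit_nonneg acc h0 v.toNat) j
      rw [pv_bor_bit_tb acc h0, h]; rfl
    · rw [if_neg hcnd]; exact IH _ h0 j h

theorem pv_row_sound (mask : Int) (row : List Int) : ∀ acc : Int, 0 ≤ acc → ∀ j : Nat,
    (altStepRow mask acc row).testBit j = true →
    acc.testBit j = true ∨ (mask.testBit j = true ∧ ∃ v ∈ row, v.toNat = j) := by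
  induction row with
  | nil => intro acc _ j h; exact Or.inl h
  | cons v rest IH =>
    intro acc h0 j h
    simp only [altStepRow, List.foldl_cons] at h
    by_cases hcnd : PySem.Int.band (pvShr mask v.toNat) 1 ≠ 0
    · rw [if_pos hcnd] at h
      rcases IH _ (pv_bor_bit_nonneg acc h0 v.toNat) j h with h1 | ⟨h1, w, hw, hw2⟩
      · rw [pv_bor_bit_tb acc h0] at h1
        rcases Bool.or_eq_true_iff.mp h1 with h2 | h2
        · exact Or.inl h2
        · right
          have hj : v.toNat = j := of_decide_eq_true h2
          subst hj
          exact ⟨(pv_band_shift_one_ne_zero mask v.toNat).mp hcnd, v, by simp⟩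
      · exact Or.inr ⟨h1, w, by simp [hw], hw2⟩
    · rw [if_neg hcnd] at h
      rcases IH _ h0 j h with h1 | ⟨h1, w, hw, hw2⟩
      · exact Or.inl h1
      · exact Or.inr ⟨h1, w, by simp [hw], hw2⟩

theorem pv_row_complete (mask : Int) (row : List Int) : ∀ acc : Int, 0 ≤ acc →
    ∀ v ∈ row, mask.testBit v.toNat = true →
    (altStepRow mask acc row).testBit v.toNat = true := by
  induction row with
  | nil => intro acc _ v hv; simp at hv
  | cons w rest IH =>
    intro acc h0 v hv hm
    simp only [altStepRow, List.foldl_cons]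
    rcases List.mem_cons.mp hv with rfl | hv
    · have hcnd : PySem.Int.band (pvShr mask v.toNat) 1 ≠ 0 :=
        (pv_band_shift_one_ne_zero mask v.toNat).mpr hm
      rw [if_pos hcnd]
      apply pv_row_mono mask rest _ (pv_bor_bit_nonneg acc h0 v.toNat)
      rw [pv_bor_bit_tb acc h0]
      simp
    · by_cases hcnd : PySem.Int.band (pvShr mask w.toNat) 1 ≠ 0
      · rw [if_pos hcnd]; exact IH _ (pv_bor_bit_nonneg acc h0 w.toNat) v hv hm
      · rw [if_neg hcnd]; exact IH _ h0 v hv hm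

-- altStep as a fold over Nat indices
theorem pv_altStep_eq (mask : Int) (graph : List (List Int)) (R : Int) :
    altStep mask graph R = (List.range graph.length).foldl (fun a u =>
      if PySem.Int.band (pvShr R u) 1 ≠ 0 then altStepRow mask a (graph.getD u [])
      else a) R := by
  rw [altStep, PySem.List.pyRange_zero_natCast, List.foldl_map]
  congr 1
  funext a u
  rw [Int.toNat_natCast, PySem.List.pyGet?_natCast, pv_getD_row]

theorem pv_gfold_nonneg (mask : Int) (graph : List (List Int)) (R : Int) (l : List Nat) :
    ∀ acc : Int, 0 ≤ acc → 0 ≤ l.foldl (fun a u =>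
      if PySem.Int.band (pvShr R u) 1 ≠ 0 then altStepRow mask a (graph.getD u [])
      else a) acc := by
  induction l with
  | nil => intro acc h; exact h
  | cons u rest IH =>
    intro acc h
    simp only [List.foldl_cons]
    by_cases hcnd : PySem.Int.band (pvShr R u) 1 ≠ 0
    · rw [if_pos hcnd]; exact IH _ (pv_row_nonneg mask _ acc h)
    · rw [if_neg hcnd]; exact IH _ h

theorem pv_gfold_mono (mask : Int) (graph : List (List Int)) (R : Int) (l : List Nat) :
    ∀ acc : Int, 0 ≤ acc → ∀ j : Nat, acc.testBit j = true →
    (l.foldl (fun a u =>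
      if PySem.Int.band (pvShr R u) 1 ≠ 0 then altStepRow mask a (graph.getD u [])
      else a) acc).testBit j = true := by
  induction l with
  | nil => intro acc _ j h; exact h
  | cons u rest IH =>
    intro acc h0 j h
    simp only [List.foldl_cons]
    by_cases hcnd : PySem.Int.band (pvShr R u) 1 ≠ 0
    · rw [if_pos hcnd]
      exact IH _ (pv_row_nonneg mask _ acc h0) j (pv_row_mono mask _ acc h0 j h)
    · rw [if_neg hcnd]; exact IH _ h0 j h

theorem pv_gfold_sound (mask : Int) (graph : List (List Int)) (R : Int) (l : List Nat) :
    ∀ acc : Int, 0 ≤ acc → ∀ j : Nat,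
    (l.foldl (fun a u =>
      if PySem.Int.band (pvShr R u) 1 ≠ 0 then altStepRow mask a (graph.getD u [])
      else a) acc).testBit j = true →
    acc.testBit j = true ∨ (mask.testBit j = true ∧
      ∃ u ∈ l, R.testBit u = true ∧ ∃ v ∈ graph.getD u [], v.toNat = j) := by
  induction l with
  | nil => intro acc _ j h; exact Or.inl h
  | cons u rest IH =>
    intro acc h0 j h
    simp only [List.foldl_cons] at h
    by_cases hcnd : PySem.Int.band (pvShr R u) 1 ≠ 0
    · rw [if_pos hcnd] at h
      rcases IH _ (pv_row_nonneg mask _ acc h0) j h with h1 | ⟨h1, w, hw, hw2, hw3⟩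
      · rcases pv_row_sound mask _ acc h0 j h1 with h2 | ⟨h2, v, hv, hv2⟩
        · exact Or.inl h2
        · exact Or.inr ⟨h2, u, by simp, (pv_band_shift_one_ne_zero R u).mp hcnd, v, hv, hv2⟩
      · exact Or.inr ⟨h1, w, by simp [hw], hw2, hw3⟩
    · rw [if_neg hcnd] at h
      rcases IH _ h0 j h with h1 | ⟨h1, w, hw, hw2, hw3⟩
      · exact Or.inl h1
      · exact Or.inr ⟨h1, w, by simp [hw], hw2, hw3⟩

theorem pv_gfold_complete (mask : Int) (graph : List (List Int)) (R : Int) (l : List Nat)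
    (u : Nat) (hu : u ∈ l) (hR : R.testBit u = true) (v : Int)
    (hv : v ∈ graph.getD u []) (hm : mask.testBit v.toNat = true) :
    ∀ acc : Int, 0 ≤ acc →
    (l.foldl (fun a u =>
      if PySem.Int.band (pvShr R u) 1 ≠ 0 then altStepRow mask a (graph.getD u [])
      else a) acc).testBit v.toNat = true := by
  induction l with
  | nil => simp at hu
  | cons w rest IH =>
    intro acc h0
    simp only [List.foldl_cons]
    rcases List.mem_cons.mp hu with rfl | hu
    · have hcnd : PySem.Int.band (pvShr R u) 1 ≠ 0 :=
        (pv_band_shift_one_ne_zero R u).mpr hR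
      rw [if_pos hcnd]
      apply pv_gfold_mono mask graph R rest _ (pv_row_nonneg mask _ acc h0)
      exact pv_row_complete mask _ acc h0 v hv hm
    · by_cases hcnd : PySem.Int.band (pvShr R w) 1 ≠ 0
      · rw [if_pos hcnd]; exact IH hu _ (pv_row_nonneg mask _ acc h0)
      · rw [if_neg hcnd]; exact IH hu _ h0

theorem pv_step_nonneg (mask : Int) (graph : List (List Int)) (R : Int) (h : 0 ≤ R) :
    0 ≤ altStep mask graph R := by
  rw [pv_altStep_eq]; exact pv_gfold_nonneg mask graph R _ R h

theorem pv_step_mono (mask : Int) (graph : List (List Int)) (R : Int) (h0 : 0 ≤ R) (j : Nat)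
    (h : R.testBit j = true) : (altStep mask graph R).testBit j = true := by
  rw [pv_altStep_eq]; exact pv_gfold_mono mask graph R _ R h0 j h

theorem pv_step_sound (mask : Int) (graph : List (List Int)) (R : Int) (h0 : 0 ≤ R) (j : Nat)
    (h : (altStep mask graph R).testBit j = true) :
    R.testBit j = true ∨ (mask.testBit j = true ∧
      ∃ u : Nat, u < graph.length ∧ R.testBit u = true ∧
        ∃ v ∈ graph.getD u [], v.toNat = j) := by
  rw [pv_altStep_eq] at h
  rcases pv_gfold_sound mask graph R _ R h0 j h with h1 | ⟨h1, u, hu, hu2, hu3⟩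
  · exact Or.inl h1
  · exact Or.inr ⟨h1, u, List.mem_range.mp hu, hu2, hu3⟩

theorem pv_step_complete (mask : Int) (graph : List (List Int)) (R : Int) (h0 : 0 ≤ R)
    (u : Nat) (hu : u < graph.length) (hR : R.testBit u = true) (v : Int)
    (hv : v ∈ graph.getD u []) (hm : mask.testBit v.toNat = true) :
    (altStep mask graph R).testBit v.toNat = true := by
  rw [pv_altStep_eq]
  exact pv_gfold_complete mask graph R _ u (List.mem_range.mpr hu) hR v hv hm R h0

def pvCnt (R : Int) (n : Nat) : Nat :=
  ((Finset.range n).filter (fun j => R.testBit j = true)).card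

theorem pv_iter_spec (mask : Int) (graph : List (List Int)) (s : Nat)
    (hPre : SafeRch mask graph s) :
    ∀ f R, SInv R graph.length → graph.length < f + pvCnt R graph.length →
    (∀ j, R.testBit j = true → Rch mask graph s j) →
    SInv (altIter mask graph f R) graph.length ∧
    (∀ j, R.testBit j = true → (altIter mask graph f R).testBit j = true) ∧
    (∀ j, (altIter mask graph f R).testBit j = true → Rch mask graph s j) ∧
    altStep mask graph (altIter mask graph f R) = altIter mask graph f R := by
  intro f
  induction f with
  | zero =>
    intro R hS hcnt hsound
    exfalso
    have : pvCnt R graph.length ≤ graph.length := by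
      have := Finset.card_filter_le (Finset.range graph.length)
        (fun j => R.testBit j = true)
      rw [Finset.card_range] at this
      exact this
    omega
  | succ f IH =>
    intro R hS hcnt hsound
    obtain ⟨hR0, hRb⟩ := hS
    simp only [altIter]
    by_cases hfix : altStep mask graph R = R
    · rw [if_pos hfix]
      exact ⟨⟨hR0, hRb⟩, fun j h => h, hsound, hfix⟩
    · rw [if_neg hfix]
      have hsound' : ∀ j, (altStep mask graph R).testBit j = true → Rch mask graph s j := by
        intro j hj
        rcases pv_step_sound mask graph R hR0 j hj with h1 | ⟨h1, u, _, hu2, v, hv, hv2⟩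
        · exact hsound j h1
        · have hru : Rch mask graph s u := hsound u hu2
          obtain ⟨_, hnn⟩ := hPre u hru
          subst hv2
          exact Rch.step hru hv (hnn v hv) h1
      have hS' : SInv (altStep mask graph R) graph.length := by
        refine ⟨pv_step_nonneg mask graph R hR0, ?_⟩
        intro j hj
        exact (hPre j (hsound' j hj)).1
      have hcnt' : graph.length < f + pvCnt (altStep mask graph R) graph.length := by
        have hsub : (Finset.range graph.length).filter (fun j => R.testBit j = true) ⊆
            (Finset.range graph.length).filter
              (fun j => (altStep mask graph R).testBit j = true) := by
          intro j hj
          obtain ⟨h1, h2⟩ := Finset.mem_filter.mp hj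
          exact Finset.mem_filter.mpr ⟨h1, pv_step_mono mask graph R hR0 j h2⟩
        have hne : (Finset.range graph.length).filter (fun j => R.testBit j = true) ≠
            (Finset.range graph.length).filter
              (fun j => (altStep mask graph R).testBit j = true) := by
          intro heq
          apply hfix
          apply pv_int_ext
          intro j
          by_cases hjn : j < graph.length
          · have := Finset.ext_iff.mp heq j
            simp only [Finset.mem_filter, Finset.mem_range, hjn, true_and] at this
            cases h1 : R.testBit j <;> cases h2 : (altStep mask graph R).testBit j
            · rfl
            · rw [h1, h2] at this; simp at this
            · rw [h1, h2] at this; simp at this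
            · rfl
          · have b1 : (altStep mask graph R).testBit j = false := by
              cases h2 : (altStep mask graph R).testBit j
              · rfl
              · exact absurd (hS'.2 j h2) hjn
            have b2 : R.testBit j = false := by
              cases h2 : R.testBit j
              · rfl
              · exact absurd (hRb j h2) hjn
            rw [b1, b2]
        have hlt : pvCnt R graph.length < pvCnt (altStep mask graph R) graph.length :=
          Finset.card_lt_card (ssubset_of_subset_of_ne hsub hne)
        omega
      obtain ⟨hS2, hmono2, hsound2, hfix2⟩ := IH (altStep mask graph R) hS' hcnt' hsound'
      exact ⟨hS2, fun j h => hmono2 j (pv_step_mono mask graph R hR0 j h), hsound2, hfix2⟩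

-- ---- start scans ----

theorem pv_find_spec (m : Int) : ∀ l : List Int, (∀ i ∈ l, 0 ≤ i) →
    (bfsFind m l = (m, []) ∧ altFind m l = -1 ∧ ∀ i ∈ l, m.testBit i.toNat = false) ∨
    (∃ i l1 l2, l = l1 ++ i :: l2 ∧ (∀ w ∈ l1, m.testBit w.toNat = false) ∧ 0 ≤ i ∧
      m.testBit i.toNat = true ∧ altFind m l = i ∧
      bfsFind m l = (PySem.Int.band m (Int.not (pvBit i.toNat)), [i])) := by
  intro l
  induction l with
  | nil => intro _; left; exact ⟨rfl, rfl, by simp⟩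
  | cons i rest IH =>
    intro hl
    by_cases h : m.testBit i.toNat = true
    · right
      have hc1 : PySem.Int.band m (pvBit i.toNat) ≠ 0 :=
        (pv_band_bit_ne_zero m i.toNat).mpr h
      have hc2 : PySem.Int.band (pvShr m i.toNat) 1 ≠ 0 :=
        (pv_band_shift_one_ne_zero m i.toNat).mpr h
      refine ⟨i, [], rest, by simp, by simp, hl i (by simp), h, ?_, ?_⟩
      · simp only [altFind]; rw [if_pos hc2]
      · simp only [bfsFind]; rw [if_pos hc1]
    · have hc1 : ¬ PySem.Int.band m (pvBit i.toNat) ≠ 0 := by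
        intro hne; exact h ((pv_band_bit_ne_zero m i.toNat).mp hne)
      have hc2 : ¬ PySem.Int.band (pvShr m i.toNat) 1 ≠ 0 := by
        intro hne; exact h ((pv_band_shift_one_ne_zero m i.toNat).mp hne)
      rcases IH (fun w hw => hl w (by simp [hw])) with ⟨h1, h2, h3⟩ |
        ⟨w, l1, l2, hsp, hpref, hw0, hwt, h1, h2⟩
      · left
        refine ⟨?_, ?_, ?_⟩
        · simp only [bfsFind]; rw [if_neg hc1]; exact h1
        · simp only [altFind]; rw [if_neg hc2]; exact h2
        · intro w hw
          rcases List.mem_cons.mp hw with rfl | hw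
          · rw [Bool.not_eq_true] at h; exact h
          · exact h3 w hw
      · right
        refine ⟨w, i :: l1, l2, by rw [hsp]; rfl, ?_, hw0, hwt, ?_, ?_⟩
        · intro x hx
          rcases List.mem_cons.mp hx with rfl | hx
          · rw [Bool.not_eq_true] at h; exact h
          · exact hpref x hx
        · simp only [altFind]; rw [if_neg hc2]; exact h1
        · simp only [bfsFind]; rw [if_neg hc1]; exact h2

-- find? on a sorted list returns the least element satisfying the predicate
theorem pv_find?_first (p : Int → Bool) : ∀ l : List Int, l.Pairwise (· < ·) →
    ∀ i, i ∈ l → p i = true → (∀ w ∈ l, w < i → p w = false) →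
    l.find? p = some i := by
  intro l
  induction l with
  | nil => intro _ i hi; simp at hi
  | cons h t IH =>
    intro hp i hi hpi hpref
    by_cases he : h = i
    · subst he
      simp [List.find?_cons, hpi]
    · have hit : i ∈ t := by
        rcases List.mem_cons.mp hi with rfl | hx
        · exact absurd rfl he
        · exact hx
      have hlt : h < i := (List.pairwise_cons.mp hp).1 i hit
      have hph : p h = false := hpref h (by simp) hlt
      simp only [List.find?_cons, hph, cond_false]
      exact IH (List.pairwise_cons.mp hp).2 i hit hpi
        (fun w hw hlt2 => hpref w (by simp [hw]) hlt2)

-- pyRange is strictly increasing; bitLength bounds/forces set bits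
theorem pv_pyRange_nil (a b : Int) (h : b ≤ a) : PySem.List.pyRange a b = [] := by
  rw [List.eq_nil_iff_forall_not_mem]
  intro x hx
  have := PySem.List.mem_pyRange_one.mp hx
  omega

theorem pv_pyRange_pairwise_aux (n : Nat) : ∀ a b : Int, (b - a).toNat ≤ n →
    (PySem.List.pyRange a b).Pairwise (· < ·) := by
  induction n with
  | zero =>
    intro a b h
    rw [pv_pyRange_nil a b (by omega)]
    exact List.Pairwise.nil
  | succ n IH =>
    intro a b h
    by_cases hab : a < b
    · rw [PySem.List.pyRange_one_cons hab]
      refine List.Pairwise.cons ?_ (IH (a + 1) b (by omega))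
      intro y hy
      have := PySem.List.mem_pyRange_one.mp hy
      omega
    · rw [pv_pyRange_nil a b (by omega)]
      exact List.Pairwise.nil

theorem pv_pyRange_pairwise (a b : Int) : (PySem.List.pyRange a b).Pairwise (· < ·) :=
  pv_pyRange_pairwise_aux (b - a).toNat a b le_rfl

theorem pv_tb_lt_bitLength (mask : Int) (j : Nat) (h0 : 0 ≤ mask)
    (h : mask.testBit j = true) : j < PySem.Int.bitLength mask := by
  obtain ⟨m, rfl⟩ := Int.eq_ofNat_of_zero_le h0
  by_contra hge
  have h2 : m < 2 ^ PySem.Int.bitLength ((m : Nat) : Int) := by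
    have h4 := PySem.Int.lt_two_pow_bitLength ((m : Nat) : Int)
    simpa using h4
  have h3 : m < 2 ^ j := lt_of_lt_of_le h2 (Nat.pow_le_pow_right (by omega) (by omega))
  rw [pv_tb_natCast, Nat.testBit_lt_two_pow h3] at h
  exact Bool.false_ne_true h

theorem pv_tb_neg_high (mask : Int) (j : Nat) (hneg : mask < 0)
    (hj : PySem.Int.bitLength mask ≤ j) : mask.testBit j = true := by
  rcases mask with m | m
  · exfalso
    rw [show Int.ofNat m = (m : Int) from rfl] at hneg
    omega
  · rw [pv_tb_negSucc]
    have h2 : (Int.negSucc m).natAbs < 2 ^ PySem.Int.bitLength (Int.negSucc m) :=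
      PySem.Int.lt_two_pow_bitLength _
    have habs : (Int.negSucc m).natAbs = m + 1 := rfl
    have hle := Nat.pow_le_pow_right (show 1 ≤ 2 by omega) hj
    have h3 : m < 2 ^ j := by omega
    rw [Nat.testBit_lt_two_pow h3]
    rfl

theorem pv_bitLength_pos (mask : Int) (hneg : mask < 0) :
    1 ≤ PySem.Int.bitLength mask := by
  have h2 := PySem.Int.lt_two_pow_bitLength mask
  by_contra h
  have hL : PySem.Int.bitLength mask = 0 := by omega
  rw [hL] at h2
  simp at h2
  omega

-- the first masked index of 1..N is what the truncated scan of pvStart finds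
theorem pv_start_some (mask N : Int) (i : Int) (l1 l2 : List Int)
    (hsplit : PySem.List.pyRange 1 (N + 1) = l1 ++ i :: l2)
    (hpref : ∀ w ∈ l1, mask.testBit w.toNat = false)
    (hit : mask.testBit i.toNat = true) :
    pvStart mask N = some i := by
  have hi : i ∈ PySem.List.pyRange 1 (N + 1) := by rw [hsplit]; simp
  have hi1 : 1 ≤ i := ((PySem.List.mem_pyRange_one).mp hi).1
  have hiN : i < N + 1 := ((PySem.List.mem_pyRange_one).mp hi).2
  have hpair := pv_pyRange_pairwise 1 (N + 1)
  -- every range element below i has its bit clear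
  have hbelow : ∀ w ∈ PySem.List.pyRange 1 (N + 1), w < i → mask.testBit w.toNat = false := by
    intro w hw hlt
    rw [hsplit] at hw
    rcases List.mem_append.mp hw with hm1 | hm1
    · exact hpref w hm1
    · exfalso
      rcases List.mem_cons.mp hm1 with rfl | hm1
      · omega
      · rw [hsplit] at hpair
        obtain ⟨_, hp2, _⟩ := List.pairwise_append.mp hpair
        have := (List.pairwise_cons.mp hp2).1 _ hm1
        omega
  -- the first hit lies below bitLength mask + 2
  have hib : i < (PySem.Int.bitLength mask : Int) + 2 := by
    rcases lt_or_ge mask 0 with hneg | hpos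
    · by_contra hgt
      have hL1 := pv_bitLength_pos mask hneg
      have hbit := pv_tb_neg_high mask (PySem.Int.bitLength mask) hneg le_rfl
      have hmem : ((PySem.Int.bitLength mask : Nat) : Int) ∈ PySem.List.pyRange 1 (N + 1) :=
        (PySem.List.mem_pyRange_one).mpr ⟨by omega, by omega⟩
      have hz := hbelow _ hmem (by omega)
      rw [Int.toNat_natCast] at hz
      rw [hz] at hbit
      exact Bool.false_ne_true hbit
    · have := pv_tb_lt_bitLength mask i.toNat hpos hit
      omega
  unfold pvStart
  apply pv_find?_first _ _ (pv_pyRange_pairwise _ _) i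
  · exact (PySem.List.mem_pyRange_one).mpr ⟨hi1, by omega⟩
  · exact hit
  · intro w hw hlt
    have hwm := (PySem.List.mem_pyRange_one).mp hw
    exact hbelow w ((PySem.List.mem_pyRange_one).mpr ⟨hwm.1, by omega⟩) hlt

-- ---- the Pre_ closure computes every visited node ----

theorem pv_subset_stepSet (mask : Int) (graph : List (List Int)) (S : Finset Nat) :
    S ⊆ pvStepSet mask graph S := Finset.subset_union_left

theorem pv_stepSet_subset (mask : Int) (graph : List (List Int)) (S : Finset Nat) :
    pvStepSet mask graph S ⊆ S ∪ pvUniv mask graph := by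
  intro x hx
  rcases Finset.mem_union.mp hx with hx | hx
  · exact Finset.mem_union_left _ hx
  · obtain ⟨u, hu, hx2⟩ := Finset.mem_biUnion.mp hx
    apply Finset.mem_union_right
    apply Finset.mem_biUnion.mpr
    refine ⟨u, hu, ?_⟩
    by_cases hm : u ∈ S
    · rwa [if_pos hm] at hx2
    · rw [if_neg hm] at hx2; exact absurd hx2 (Finset.notMem_empty x)

theorem pv_mem_stepSet (mask : Int) (graph : List (List Int)) (S : Finset Nat)
    (u : Nat) (hu : u ∈ S) (hlen : u < graph.length) (v : Int)
    (hv : v ∈ graph.getD u []) (h0 : 0 ≤ v) (hm : mask.testBit v.toNat = true) :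
    v.toNat ∈ pvStepSet mask graph S := by
  apply Finset.mem_union_right
  apply Finset.mem_biUnion.mpr
  refine ⟨u, Finset.mem_range.mpr hlen, ?_⟩
  rw [if_pos hu]
  unfold pvRowTargets
  rw [List.mem_toFinset]
  exact List.mem_map.mpr ⟨v, List.mem_filter.mpr ⟨hv, by simp [h0, hm]⟩, rfl⟩

theorem pv_iterSet_spec (mask : Int) (graph : List (List Int)) (B : Finset Nat)
    (hU : pvUniv mask graph ⊆ B) :
    ∀ f S, S ⊆ B → B.card < f + S.card →
    S ⊆ pvIterSet mask graph f S ∧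
    pvStepSet mask graph (pvIterSet mask graph f S) = pvIterSet mask graph f S := by
  intro f
  induction f with
  | zero =>
    intro S hSB hc
    exfalso
    have := Finset.card_le_card hSB
    omega
  | succ f IH =>
    intro S hSB hc
    simp only [pvIterSet]
    by_cases hfix : pvStepSet mask graph S = S
    · rw [if_pos hfix]
      exact ⟨Finset.Subset.refl S, hfix⟩
    · rw [if_neg hfix]
      have hsub : S ⊆ pvStepSet mask graph S := pv_subset_stepSet mask graph S
      have hSB' : pvStepSet mask graph S ⊆ B := by
        intro x hx
        rcases Finset.mem_union.mp (pv_stepSet_subset mask graph S hx) with hx | hx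
        · exact hSB hx
        · exact hU hx
      have hcard : S.card < (pvStepSet mask graph S).card :=
        Finset.card_lt_card (ssubset_of_subset_of_ne hsub (fun h => hfix h.symm))
      obtain ⟨h1, h2⟩ := IH (pvStepSet mask graph S) hSB' (by omega)
      exact ⟨hsub.trans h1, h2⟩

-- Pre_ safety transfers to every BFS-visited node
theorem pv_pre_safe (mask : Int) (graph : List (List Int)) (N : Int) (i : Int)
    (hstart : pvStart mask N = some i) (hPre : Pre_bfs mask graph N) :
    SafeRch mask graph i.toNat := by
  have hR : pvReachSet mask graph N =
      pvIterSet mask graph ((insert i.toNat (pvUniv mask graph)).card + 1) {i.toNat} := by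
    unfold pvReachSet
    rw [hstart]
  obtain ⟨hsub, hfix⟩ := pv_iterSet_spec mask graph (insert i.toNat (pvUniv mask graph))
    (Finset.subset_insert _ _) ((insert i.toNat (pvUniv mask graph)).card + 1) {i.toNat}
    (Finset.singleton_subset_iff.mpr (Finset.mem_insert_self _ _))
    (by rw [Finset.card_singleton]; omega)
  have hmem : ∀ u : Nat, Rch mask graph i.toNat u → u ∈ pvReachSet mask graph N := by
    intro u hu
    induction hu with
    | base =>
      rw [hR]
      exact hsub (Finset.mem_singleton_self _)
    | step hu hv h0 hm IH =>
      rename_i u' v'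
      obtain ⟨hlen, _⟩ := hPre u' IH
      rw [hR] at IH ⊢
      rw [← hfix]
      exact pv_mem_stepSet mask graph _ u' IH hlen v' hv h0 hm
  intro u hu
  exact hPre u (hmem u hu)

-- ===== VERDICT (by name: the statement is the Claim_ definition above) =====
theorem bfs_spec : Claim_equal_bfs := by
  intro mask graph N _ hPre
  unfold Spec_bfs bfs bfs_alt
  have hl : ∀ i ∈ PySem.List.pyRange 1 (N + 1), 0 ≤ i := by
    intro i hi
    have := (PySem.List.mem_pyRange_one).mp hi
    omega
  rcases pv_find_spec mask (PySem.List.pyRange 1 (N + 1)) hl with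
    ⟨h1, h2, _⟩ | ⟨i, l1, l2, hsplit, hpref, hi0, hit, h2, h1⟩
  · rw [h1, h2]
    rw [if_pos (by norm_num)]
    have : bfsLoop graph (graph.length + 2) mask [] = mask := by
      rw [show graph.length + 2 = (graph.length + 1) + 1 from rfl]
      simp only [bfsLoop]
    rw [this]
  · have hstart : pvStart mask N = some i :=
      pv_start_some mask N i l1 l2 hsplit hpref hit
    have hHP : SafeRch mask graph i.toNat := pv_pre_safe mask graph N i hstart hPre
    have hin : i.toNat < graph.length := (hHP i.toNat Rch.base).1
    rw [h1, h2]
    rw [if_neg (by omega)]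
    -- A side
    have hInv0 : InvA mask graph i.toNat {i.toNat}
        (PySem.Int.band mask (Int.not (pvBit i.toNat))) [i] := by
      refine ⟨?_, ?_, ?_, ?_, by simp⟩
      · intro j
        rw [pv_clear_tb]
        have he2 : (decide (i.toNat = j)) = (decide (j ∈ ({i.toNat} : Finset Nat))) := by
          simp [Finset.mem_singleton, eq_comm]
        rw [he2]
      · intro x hx
        rcases List.mem_singleton.mp hx with rfl
        exact ⟨hi0, by simp⟩
      · intro c hcm
        rcases Finset.mem_singleton.mp hcm with rfl
        exact Rch.base
      · intro c hcm
        rcases Finset.mem_singleton.mp hcm with rfl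
        exact Finset.mem_filter.mpr ⟨Finset.mem_range.mpr hin, hit⟩
    have hCl0 : ClosedExc mask graph {i.toNat} [i] none := by
      intro c hcm hnq _
      exfalso
      rcases Finset.mem_singleton.mp hcm with rfl
      apply hnq
      rw [show ((i.toNat : Nat) : Int) = i by omega]
      simp
    have hmeas : (pvBits mask graph.length).card + ([i] : List Int).length <
        (graph.length + 2) + ({i.toNat} : Finset Nat).card := by
      have : (pvBits mask graph.length).card ≤ graph.length := by
        have := Finset.card_filter_le (Finset.range graph.length)
          (fun j => mask.testBit j = true)
        rw [Finset.card_range] at this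
        exact this
      simp
      omega
    have hA := pv_loop_spec mask graph i.toNat hHP (graph.length + 2) _ _ _ hInv0 hCl0 hmeas
    -- B side
    have hS0 : SInv (pvBit i.toNat) graph.length := by
      constructor
      · rw [pv_one_shift]; exact Int.natCast_nonneg _
      · intro j hj
        rw [pv_tb_one_shift] at hj
        have : i.toNat = j := of_decide_eq_true hj
        omega
    have hsound0 : ∀ j, (pvBit i.toNat).testBit j = true →
        Rch mask graph i.toNat j := by
      intro j hj
      rw [pv_tb_one_shift] at hj
      have : i.toNat = j := of_decide_eq_true hj
      subst this
      exact Rch.base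
    obtain ⟨hS, hmono, hsound, hfix⟩ := pv_iter_spec mask graph i.toNat hHP
      (graph.length + 1) _ hS0 (by omega) hsound0
    have hcomp : ∀ k, Rch mask graph i.toNat k →
        (altIter mask graph (graph.length + 1) (pvBit i.toNat)).testBit k = true := by
      intro k hk
      induction hk with
      | base =>
        apply hmono
        rw [pv_tb_one_shift]
        simp
      | @step u v hu hv h0 hm IH2 =>
        have hun : u < graph.length := hS.2 u IH2
        rw [← hfix]
        exact pv_step_complete mask graph _ hS.1 u hun IH2 v hv hm
    have hB : (PySem.Int.band mask
        (Int.not (altIter mask graph (graph.length + 1) (pvBit i.toNat))) = 0) ↔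
        (∀ j, mask.testBit j = true → Rch mask graph i.toNat j) := by
      rw [pv_band_not_eq_zero]
      constructor
      · intro h j hj; exact hsound j (h j hj)
      · intro h j hj; exact hcomp j (h j hj)
    rw [decide_eq_decide]
    rw [hA, hB]
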